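-- pv_equiv track=rewrite | github.com/leonlan/projecteuler | pe101_125/pe125.py | palindromic_numbers
-- ===== SOURCE A (Python) =====
-- from math import ceil
--
-- def palindromic_numbers(D):
--     """Generates all palindromic numbers up to D digits."""
--
--     def reverse(n):
--         return(str(n)[::-1])
--
--     palindromes = []
--     for d in range(1, D+1):
--         for n in range(10**(ceil(d/2)-1), 10**(ceil(d/2))):
--             if d != 1:
--                 if d % 2 == 0:
--                     x = int(str(n)+reverse(n))
--                 else:
--                     x = int(str(n)+reverse(str(n)[:-1]))
--             else:
--                 x = n
--             palindromes.append(x)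
--     return(palindromes)
-- ===== SOURCE B (Python) =====
-- def palindromic_numbers(D):
--     """Generates all palindromic numbers up to D digits."""
--
--     def inner(k):
--         # palindromic digit strings of exact length k (leading zeros allowed), as ints
--         if k <= 0:
--             return [0]
--         if k == 1:
--             return list(range(10))
--         return [a * 10 ** (k - 1) + p * 10 + a for a in range(10) for p in inner(k - 2)]
--
--     out = []
--     for d in range(1, D + 1):
--         if d == 1:
--             out.extend(range(1, 10))
--         else:
--             out.extend(a * 10 ** (d - 1) + p * 10 + a for a in range(1, 10) for p in inner(d - 2))
--     return out
-- ===== Notes on version B (the rewrite author's own statement) =====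
-- stated objective: alternative
-- what changed: B builds the palindromes of each length recursively — wrapping every shorter palindrome (with leading zeros allowed) in a pair of equal outer digits — instead of A's enumeration of first halves mirrored via str/slice/int round-trips; no half-number enumeration or string reversal remains.
import Mathlib
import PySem

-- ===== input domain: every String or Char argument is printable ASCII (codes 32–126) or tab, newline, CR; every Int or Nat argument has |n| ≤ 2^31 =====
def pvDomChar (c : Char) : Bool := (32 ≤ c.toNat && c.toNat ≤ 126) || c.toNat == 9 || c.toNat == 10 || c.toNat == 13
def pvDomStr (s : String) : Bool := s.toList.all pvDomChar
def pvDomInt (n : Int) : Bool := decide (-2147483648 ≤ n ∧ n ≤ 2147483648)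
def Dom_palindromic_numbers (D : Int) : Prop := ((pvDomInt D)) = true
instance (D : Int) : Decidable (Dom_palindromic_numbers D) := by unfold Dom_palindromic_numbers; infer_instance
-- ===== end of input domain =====

-- B abandons A's half-enumeration-and-string-mirroring entirely: it builds the palindromes of
-- length d recursively, wrapping each shorter palindrome (leading zeros allowed) in a pair of
-- equal outer digits, with pure integer arithmetic — no string conversion, slicing or parsing.

-- ===== PORT A =====
-- helper `reverse(n)` of A: str(n)[::-1], ported on the char-list side (step -1 slice never raises)
def pyReverseChars (s : List Char) : List Char := (PySem.List.slice? s none none (-1)).getD []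

def palindromic_numbers (D : Int) : List Int :=
  (PySem.List.pyRange 1 (D + 1) 1).foldl (fun palindromes d =>
    -- math.ceil(d/2) = (d+1)//2: exact for every int d here (d ≤ 2^31 is far below float precision loss)
    let c := PySem.Int.floordiv (d + 1) 2
    -- 10**(c-1), 10**c: c ≥ 1 for every d the loop visits, so the exponents are the Nats (c-1).toNat, c.toNat
    (PySem.List.pyRange (10 ^ (c - 1).toNat) (10 ^ c.toNat) 1).foldl (fun pal n =>
      let x : Int :=
        if d ≠ 1 then
          if PySem.Int.mod d 2 = 0 then
            -- int(str(n)+reverse(n)); the argument is a nonempty digit string, so int() never raises (.getD 0 unreachable)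
            (PySem.Int.ofChars? (PySem.Int.toChars n ++ pyReverseChars (PySem.Int.toChars n))).getD 0
          else
            -- int(str(n)+reverse(str(n)[:-1])); same remark
            (PySem.Int.ofChars? (PySem.Int.toChars n ++
              pyReverseChars (PySem.List.slice (PySem.Int.toChars n) none (some (-1))))).getD 0
        else n
      pal ++ [x]) palindromes) []

-- ===== PORT B =====
-- Source B's `inner(k)`: palindromic digit strings of exact length k (leading zeros allowed), as ints
def innerPal (k : Int) : List Int :=
  if _h0 : k ≤ 0 then [0]
  else if _h1 : k = 1 then PySem.List.pyRange 0 10 1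
  else
    -- [a * 10**(k-1) + p*10 + a for a in range(10) for p in inner(k-2)]; k ≥ 2 so (k-1).toNat is exact
    (PySem.List.pyRange 0 10 1).flatMap (fun a =>
      (innerPal (k - 2)).map (fun p => a * 10 ^ (k - 1).toNat + p * 10 + a))
  termination_by k.toNat
  decreasing_by omega

def palindromic_numbers_alt (D : Int) : List Int :=
  (PySem.List.pyRange 1 (D + 1) 1).foldl (fun out d =>
    if d = 1 then out ++ PySem.List.pyRange 1 10 1
    else out ++ (PySem.List.pyRange 1 10 1).flatMap (fun a =>
      (innerPal (d - 2)).map (fun p => a * 10 ^ (d - 1).toNat + p * 10 + a))) []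

-- ===== PRECONDITION & SPEC =====
def Spec_palindromic_numbers (D : Int) (out : List Int) : Prop := out = palindromic_numbers_alt D
instance (D : Int) (out : List Int) : Decidable (Spec_palindromic_numbers D out) := by unfold Spec_palindromic_numbers; infer_instance

-- ===== CLAIM (what is proved, stated in full; the proofs are below) =====
def Claim_equal_palindromic_numbers : Prop := ∀ (D : Int), Dom_palindromic_numbers D → Spec_palindromic_numbers D (palindromic_numbers D)

-- ===== LEMMAS AND PROOFS =====

-- value of an integer digit-reversal accumulator (proof-side characterisation of A's string mirror)
def revLoop (m r : Int) : Int :=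
  if h : 0 < m then revLoop (PySem.Int.floordiv m 10) (r * 10 + PySem.Int.mod m 10) else r
  termination_by m.toNat
  decreasing_by
    rw [PySem.Int.floordiv_eq_ediv_of_pos (by omega : (0:Int) < 10)]
    omega

-- reversal of the lowest t digits of m, zero-padded to t digits
def revPad : Nat → Nat → Nat
  | _, 0 => 0
  | m, t + 1 => revPad (m / 10) t + (m % 10) * 10 ^ t

theorem toDigitsCore_eq (f : Nat) : ∀ (m : Nat) (acc : List Char), m < f →
    Nat.toDigitsCore 10 f m acc =
      (if m = 0 then ['0'] else ((Nat.digits 10 m).map Nat.digitChar).reverse) ++ acc := by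
  induction f with
  | zero => omega
  | succ f ih =>
    intro m acc hf
    rw [Nat.toDigitsCore]
    by_cases h0 : m / 10 = 0
    · have hm : m < 10 := by omega
      simp only [h0, if_pos]
      by_cases hz : m = 0
      · subst hz; simp [Nat.digitChar]
      · rw [Nat.digits_def' (by norm_num) (by omega), Nat.mod_eq_of_lt hm, h0]
        simp [hz]
    · have hm10 : 10 ≤ m := by by_contra h; exact h0 (Nat.div_eq_of_lt (by omega))
      simp only [h0, reduceIte]
      rw [ih (m / 10) _ (by omega), if_neg h0]
      rw [Nat.digits_def' (show (1:Nat) < 10 by norm_num) (show 0 < m by omega)]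
      rw [if_neg (show ¬ m = 0 by omega)]
      simp

theorem toChars_eq {m : Nat} (hm : 0 < m) :
    PySem.Int.toChars (m : Int) = ((Nat.digits 10 m).map Nat.digitChar).reverse := by
  rw [PySem.Int.toChars]
  rw [if_neg (by omega)]
  have : (m : Int).toNat = m := rfl
  rw [this, Nat.toDigits, toDigitsCore_eq _ m [] (by omega)]
  simp [Nat.pos_iff_ne_zero.mp hm]

theorem g_digits (g : List Char → Bool → Nat → Option Nat)
    (h0 : ∀ b a, g [] b a = if b then some a else none)
    (h1 : ∀ c b a, g [c] b a =
      if c.isDigit then g [] true (a * 10 + (c.toNat - '0'.toNat))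
      else if c = '_' ∧ b then none else none)
    (h2 : ∀ c d tail b a, g (c :: d :: tail) b a =
      if c.isDigit then g (d :: tail) true (a * 10 + (c.toNat - '0'.toNat))
      else if c = '_' ∧ b then (if d.isDigit then g (d :: tail) false a else none)
      else none) :
    ∀ es b a, (∀ c ∈ es, c.isDigit = true) → (es = [] → b = true) →
      g es b a = some (es.foldl (fun acc c => acc * 10 + (c.toNat - '0'.toNat)) a) := by
  intro es
  induction es with
  | nil => intro b a _ hb; rw [h0, if_pos (hb rfl)]; simp
  | cons c rest ih =>
    intro b a hd _
    have hc : c.isDigit = true := hd c (by simp)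
    cases rest with
    | nil => rw [h1, if_pos hc, h0, if_pos rfl]; simp
    | cons d tail =>
      rw [h2, if_pos hc, ih true _ (fun x hx => hd x (by simp [hx])) (by simp)]
      simp

theorem foldl_digitChar (ds : List Nat) (hd : ∀ k ∈ ds, k < 10) : ∀ (a : Nat),
    (ds.map Nat.digitChar).foldl (fun acc c => acc * 10 + (c.toNat - '0'.toNat)) a =
      ds.foldl (fun acc k => acc * 10 + k) a := by
  induction ds with
  | nil => intro a; rfl
  | cons k t ih =>
    intro a
    have hk : k < 10 := hd k (by simp)
    have : (Nat.digitChar k).toNat - '0'.toNat = k := by interval_cases k <;> decide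
    simp only [List.map_cons, List.foldl_cons, this]
    exact ih (fun x hx => hd x (by simp [hx])) _

theorem foldl_acc (ds : List Nat) : ∀ a : Nat,
    ds.foldl (fun acc k => acc * 10 + k) a =
      a * 10 ^ ds.length + ds.foldl (fun acc k => acc * 10 + k) 0 := by
  induction ds with
  | nil => intro a; simp
  | cons k t ih =>
    intro a
    simp only [List.foldl_cons, List.length_cons]
    rw [ih (a * 10 + k), ih (0 * 10 + k)]
    ring

theorem foldl_rev_digits (m : Nat) :
    (Nat.digits 10 m).reverse.foldl (fun acc k => acc * 10 + k) 0 = m := by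
  have key : ∀ ds : List Nat, ds.reverse.foldl (fun acc k => acc * 10 + k) 0 = Nat.ofDigits 10 ds := by
    intro ds
    induction ds with
    | nil => simp [Nat.ofDigits]
    | cons k t ih =>
      simp only [List.reverse_cons, List.foldl_append, ih, List.foldl_cons, List.foldl_nil,
        Nat.ofDigits_cons]
      omega
  rw [key]
  exact_mod_cast Nat.ofDigits_digits 10 m

theorem revLoop_eq' (m : Nat) : ∀ r : Nat,
    revLoop (m : Int) (r : Int) = ((Nat.digits 10 m).foldl (fun acc k => acc * 10 + k) r : Nat) := by
  induction m using Nat.strong_induction_on with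
  | _ m ih =>
    intro r
    rw [revLoop]
    by_cases hm : 0 < m
    · rw [dif_pos (by exact_mod_cast hm)]
      have hfd : PySem.Int.floordiv (m : Int) 10 = ((m / 10 : Nat) : Int) := by
        exact_mod_cast PySem.Int.floordiv_natCast m 10
      have hmd : PySem.Int.mod (m : Int) 10 = ((m % 10 : Nat) : Int) := by
        exact_mod_cast PySem.Int.mod_natCast m 10
      rw [hfd, hmd]
      have : (r : Int) * 10 + ((m % 10 : Nat) : Int) = ((r * 10 + m % 10 : Nat) : Int) := by push_cast; ring
      rw [this, ih (m / 10) (Nat.div_lt_self hm (by norm_num))]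
      rw [Nat.digits_def' (show (1:Nat) < 10 by norm_num) hm]
      simp
    · rw [dif_neg (by exact_mod_cast hm)]
      have : m = 0 := by omega
      subst this
      simp

theorem digits_length_eq {m h : Nat} (h1 : 10 ^ (h - 1) ≤ m) (h2 : m < 10 ^ h) (hh : 1 ≤ h) :
    (Nat.digits 10 m).length = h := by
  have hm : m ≠ 0 := by
    have : 0 < 10 ^ (h - 1) := Nat.pow_pos (by norm_num)
    omega
  rw [Nat.length_digits 10 m (by norm_num) hm]
  have : Nat.log 10 m = h - 1 := Nat.log_eq_of_pow_le_of_lt_pow h1 (by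
    have : h - 1 + 1 = h := by omega
    rw [this]; exact h2)
  omega

def ofCharsWith (g : List Char → Bool → Nat → Option Nat) (s : List Char) : Option Int :=
  have cs := (List.dropWhile PySem.Int.isIntSpace (List.dropWhile PySem.Int.isIntSpace s).reverse).reverse
  match cs with
  | '-' :: ds => Option.map (fun n => -n) (do let a ← (match ds with | [] => none | es => g es false 0); pure ((a : Nat) : Int))
  | '+' :: ds => Option.map (fun n => n) (do let a ← (match ds with | [] => none | es => g es false 0); pure ((a : Nat) : Int))
  | ds => Option.map (fun n => n) (do let a ← (match ds with | [] => none | es => g es false 0); pure ((a : Nat) : Int))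

theorem exists_parser : ∃ g : List Char → Bool → Nat → Option Nat,
    (∀ s, PySem.Int.ofChars? s = ofCharsWith g s) ∧
    (∀ b a, g [] b a = if b then some a else none) ∧
    (∀ c b a, g [c] b a =
      if c.isDigit then g [] true (a * 10 + (c.toNat - '0'.toNat))
      else if c = '_' ∧ b then none else none) ∧
    (∀ c d tail b a, g (c :: d :: tail) b a =
      if c.isDigit then g (d :: tail) true (a * 10 + (c.toNat - '0'.toNat))
      else if c = '_' ∧ b then (if d.isDigit then g (d :: tail) false a else none)
      else none) := by
  exact ⟨_, fun s => rfl, fun b a => rfl, fun c b a => rfl, fun c d tail b a => rfl⟩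

theorem dropWhile_eq_self_of {p : Char → Bool} {l : List Char} (h : ∀ c ∈ l, p c = false) :
    List.dropWhile p l = l := by
  cases l with
  | nil => rfl
  | cons c t => rw [List.dropWhile_cons_of_neg (by simp [h c (by simp)])]

theorem ofChars?_digits (es : List Char) (hne : es ≠ []) (hd : ∀ c ∈ es, c.isDigit = true)
    (hsp : ∀ c ∈ es, PySem.Int.isIntSpace c = false)
    (hneg : es.head? ≠ some '-') (hpos : es.head? ≠ some '+') :
    PySem.Int.ofChars? es = some ((es.foldl (fun acc c => acc * 10 + (c.toNat - '0'.toNat)) 0 : Nat) : Int) := by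
  obtain ⟨g, hof, h0, h1, h2⟩ := exists_parser
  rw [hof, ofCharsWith]
  rw [dropWhile_eq_self_of hsp,
      dropWhile_eq_self_of (fun c hc => hsp c (List.mem_reverse.mp hc)),
      List.reverse_reverse]
  cases es with
  | nil => exact absurd rfl hne
  | cons c rest =>
    have hcd : c.isDigit = true := hd c (by simp)
    have hcneg : c ≠ '-' := by intro h; exact hneg (by simp [h])
    have hcpos : c ≠ '+' := by intro h; exact hpos (by simp [h])
    have hg := g_digits g h0 h1 h2 (c :: rest) false 0 hd (by simp)
    split
    · next ds heq =>
        exact absurd (by injection heq) hcneg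
    · next ds heq =>
        exact absurd (by injection heq) hcpos
    · next h1' h2' =>
      rw [show (match c :: rest with | [] => none | es => g es false 0) = g (c :: rest) false 0 from rfl,
        hg]
      rfl

theorem digit_mem_facts {m : Nat} {c : Char} (_hm : 0 < m)
    (hc : c ∈ ((Nat.digits 10 m).map Nat.digitChar).reverse ∨ c ∈ (Nat.digits 10 m).map Nat.digitChar) :
    c.isDigit = true ∧ PySem.Int.isIntSpace c = false ∧ c ≠ '-' ∧ c ≠ '+' := by
  have : ∃ k, k < 10 ∧ c = Nat.digitChar k := by
    rcases hc with h | h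
    · rw [List.mem_reverse] at h
      obtain ⟨k, hk, rfl⟩ := List.mem_map.mp h
      exact ⟨k, Nat.digits_lt_base (by norm_num) hk, rfl⟩
    · obtain ⟨k, hk, rfl⟩ := List.mem_map.mp h
      exact ⟨k, Nat.digits_lt_base (by norm_num) hk, rfl⟩
  obtain ⟨k, hk, rfl⟩ := this
  refine ⟨?_, ?_, ?_, ?_⟩ <;> interval_cases k <;> decide

theorem even_val (m : Nat) (hm : 0 < m) :
    PySem.Int.ofChars? (PySem.Int.toChars (m : Int) ++ (PySem.Int.toChars (m : Int)).reverse) =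
      some ((m * 10 ^ (Nat.digits 10 m).length +
        (Nat.digits 10 m).foldl (fun acc k => acc * 10 + k) 0 : Nat) : Int) := by
  have hne : Nat.digits 10 m ≠ [] := Nat.digits_ne_nil_iff_ne_zero.mpr (by omega : m ≠ 0)
  rw [toChars_eq hm, List.reverse_reverse]
  rw [ofChars?_digits]
  · congr 1
    rw [List.foldl_append]
    rw [← List.map_reverse, foldl_digitChar _ (fun k hk => Nat.digits_lt_base (by norm_num) (List.mem_reverse.mp hk)) 0,
      foldl_rev_digits]
    rw [foldl_digitChar _ (fun k hk => Nat.digits_lt_base (by norm_num) hk) m, foldl_acc]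
  · simp [hne]
  · intro c hc
    rw [List.mem_append] at hc
    exact (digit_mem_facts hm hc).1
  · intro c hc
    rw [List.mem_append] at hc
    exact (digit_mem_facts hm hc).2.1
  · intro hcon
    have hmem : '-' ∈ ((Nat.digits 10 m).map Nat.digitChar).reverse ++ (Nat.digits 10 m).map Nat.digitChar :=
      List.mem_of_mem_head? (by rw [hcon]; exact rfl)
    rw [List.mem_append] at hmem
    exact (digit_mem_facts hm hmem).2.2.1 rfl
  · intro hcon
    have hmem : '+' ∈ ((Nat.digits 10 m).map Nat.digitChar).reverse ++ (Nat.digits 10 m).map Nat.digitChar :=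
      List.mem_of_mem_head? (by rw [hcon]; exact rfl)
    rw [List.mem_append] at hmem
    exact (digit_mem_facts hm hmem).2.2.2 rfl

theorem odd_val (m : Nat) (hm : 10 ≤ m) :
    PySem.Int.ofChars? (PySem.Int.toChars (m : Int) ++ ((PySem.Int.toChars (m : Int)).dropLast).reverse) =
      some ((m * 10 ^ (Nat.digits 10 (m / 10)).length +
        (Nat.digits 10 (m / 10)).foldl (fun acc k => acc * 10 + k) 0 : Nat) : Int) := by
  have hm0 : 0 < m := by omega
  have hne : Nat.digits 10 m ≠ [] := Nat.digits_ne_nil_iff_ne_zero.mpr (by omega : m ≠ 0)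
  have htail : ((Nat.digits 10 m).map Nat.digitChar).tail = (Nat.digits 10 (m / 10)).map Nat.digitChar := by
    rw [Nat.digits_def' (show (1:Nat) < 10 by norm_num) hm0]
    rfl
  have hmemtl : ∀ c ∈ ((Nat.digits 10 m).map Nat.digitChar).tail, c ∈ (Nat.digits 10 m).map Nat.digitChar :=
    fun c hc => List.mem_of_mem_tail hc
  rw [toChars_eq hm0, List.dropLast_reverse, List.reverse_reverse]
  rw [ofChars?_digits]
  · congr 1
    rw [List.foldl_append]
    rw [← List.map_reverse, foldl_digitChar _ (fun k hk => Nat.digits_lt_base (by norm_num) (List.mem_reverse.mp hk)) 0,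
      foldl_rev_digits]
    rw [htail, foldl_digitChar _ (fun k hk => Nat.digits_lt_base (by norm_num) hk) m, foldl_acc]
  · simp [hne]
  · intro c hc
    rw [List.mem_append] at hc
    exact (digit_mem_facts hm0 (hc.imp id (hmemtl c))).1
  · intro c hc
    rw [List.mem_append] at hc
    exact (digit_mem_facts hm0 (hc.imp id (hmemtl c))).2.1
  · intro hcon
    have hmem : '-' ∈ ((Nat.digits 10 m).map Nat.digitChar).reverse ++ ((Nat.digits 10 m).map Nat.digitChar).tail :=
      List.mem_of_mem_head? (by rw [hcon]; exact rfl)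
    rw [List.mem_append] at hmem
    exact (digit_mem_facts hm0 (hmem.imp id (hmemtl _))).2.2.1 rfl
  · intro hcon
    have hmem : '+' ∈ ((Nat.digits 10 m).map Nat.digitChar).reverse ++ ((Nat.digits 10 m).map Nat.digitChar).tail :=
      List.mem_of_mem_head? (by rw [hcon]; exact rfl)
    rw [List.mem_append] at hmem
    exact (digit_mem_facts hm0 (hmem.imp id (hmemtl _))).2.2.2 rfl

-- A's per-element value in arithmetic form (via the string lemmas above)
theorem key_pointwise (d n : Int) (hd : 1 ≤ d)
    (hlo : 10 ^ ((PySem.Int.floordiv (d + 1) 2 - 1).toNat) ≤ n)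
    (hhi : n < 10 * 10 ^ ((PySem.Int.floordiv (d + 1) 2 - 1).toNat)) :
    (if d ≠ 1 then
        if PySem.Int.mod d 2 = 0 then
          (PySem.Int.ofChars? (PySem.Int.toChars n ++ pyReverseChars (PySem.Int.toChars n))).getD 0
        else
          (PySem.Int.ofChars? (PySem.Int.toChars n ++
            pyReverseChars (PySem.List.slice (PySem.Int.toChars n) none (some (-1))))).getD 0
      else n) =
    n * 10 ^ (d - PySem.Int.floordiv (d + 1) 2).toNat +
      revLoop (if PySem.Int.mod d 2 = 0 then n else PySem.Int.floordiv n 10) 0 := by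
  have hfd : PySem.Int.floordiv (d + 1) 2 = (d + 1) / 2 :=
    PySem.Int.floordiv_eq_ediv_of_pos (by omega)
  have hmod : PySem.Int.mod d 2 = d % 2 := PySem.Int.mod_eq_emod_of_pos (by omega)
  set h : Int := PySem.Int.floordiv (d + 1) 2 with hh
  have h1 : 1 ≤ h := by rw [hfd]; omega
  set H : Nat := (h - 1).toNat with hH
  have hpowpos : (0:Int) < 10 ^ ((PySem.Int.floordiv (d + 1) 2 - 1).toNat) := pow_pos (by norm_num) _
  have hnpos : 1 ≤ n := by omega
  set m : Nat := n.toNat with hm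
  have hnm : n = (m : Int) := by omega
  have hmlo : 10 ^ H ≤ m := by
    have : ((10 ^ H : Nat) : Int) ≤ n := by push_cast; exact hlo
    omega
  have hmhi : m < 10 ^ (H + 1) := by
    have : n < ((10 ^ (H + 1) : Nat) : Int) := by push_cast [pow_succ]; linarith
    omega
  have hm0 : 0 < m := by have : (0:Nat) < 10 ^ H := Nat.pow_pos (by norm_num); omega
  have hlen : (Nat.digits 10 m).length = H + 1 :=
    digits_length_eq (by simpa using hmlo) hmhi (by omega)
  by_cases hd1 : d = 1
  · subst hd1
    have hmod1 : PySem.Int.mod 1 2 = 1 := by decide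
    have hfd1 : PySem.Int.floordiv (1 + 1) 2 = 1 := by decide
    rw [if_neg (by simp), hmod1]
    rw [if_neg (by norm_num)]
    have hn10 : PySem.Int.floordiv n 10 = 0 := by
      rw [PySem.Int.floordiv_eq_ediv_of_pos (by omega)]
      have hH0 : H = 0 := by rw [hH, hh, hfd1]; rfl
      rw [hH0] at hmhi
      omega
    rw [hn10, revLoop]
    rw [dif_neg (by omega)]
    have : (1 - h).toNat = 0 := by omega
    rw [this]
    ring
  · rw [if_pos hd1]
    by_cases hev : PySem.Int.mod d 2 = 0
    · have hdev : d = 2 * h := by rw [hfd] at hh; omega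
      have hdh : (d - h).toNat = H + 1 := by omega
      rw [if_pos hev, if_pos hev, hdh]
      rw [hnm, pyReverseChars, PySem.List.slice?_none_none_neg_one, Option.getD_some]
      rw [even_val m hm0, Option.getD_some, hlen]
      rw [show (0:Int) = ((0:Nat) : Int) from rfl, revLoop_eq' m 0]
      push_cast
      ring
    · have hdodd : d = 2 * h - 1 := by rw [hfd] at hh; omega
      have hd3 : 3 ≤ d := by omega
      have h2 : 2 ≤ h := by omega
      have hH1 : 1 ≤ H := by omega
      have hm10 : 10 ≤ m := le_trans (by calc (10:Nat) = 10 ^ 1 := by norm_num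
                                              _ ≤ 10 ^ H := Nat.pow_le_pow_right (by norm_num) hH1) hmlo
      have hdh : (d - h).toNat = H := by omega
      have hlentl : (Nat.digits 10 (m / 10)).length = H := by
        have := Nat.digits_def' (show (1:Nat) < 10 by norm_num) (show 0 < m by omega)
        have hlc : (Nat.digits 10 m).length = (Nat.digits 10 (m / 10)).length + 1 := by
          rw [this]; rfl
        omega
      rw [if_neg hev, if_neg hev, hdh]
      rw [hnm, PySem.List.slice_to_neg_one, pyReverseChars, PySem.List.slice?_none_none_neg_one,
        Option.getD_some]
      rw [odd_val m hm10, Option.getD_some, hlentl]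
      rw [show PySem.Int.floordiv (m : Int) 10 = ((m / 10 : Nat) : Int) from PySem.Int.floordiv_natCast m 10]
      rw [show (0:Int) = ((0:Nat) : Int) from rfl, revLoop_eq' (m / 10) 0]
      push_cast
      ring

-- ===== B-side characterisation =====

theorem revPad_top (t : Nat) : ∀ a r : Nat, a < 10 → r < 10 ^ t →
    revPad (a * 10 ^ t + r) (t + 1) = revPad r t * 10 + a := by
  induction t with
  | zero =>
    intro a r ha hr
    have : r = 0 := by omega
    subst this
    simp [revPad, Nat.mod_eq_of_lt ha]
  | succ t ih =>
    intro a r ha hr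
    show revPad ((a * 10 ^ (t+1) + r) / 10) (t + 1) + ((a * 10 ^ (t+1) + r) % 10) * 10 ^ (t+1) =
      (revPad (r / 10) t + (r % 10) * 10 ^ t) * 10 + a
    have hq : a * 10 ^ (t+1) + r = (a * 10 ^ t) * 10 + r := by ring
    have hdiv : ((a * 10 ^ t) * 10 + r) / 10 = a * 10 ^ t + r / 10 := by omega
    have hmod : ((a * 10 ^ t) * 10 + r) % 10 = r % 10 := by omega
    rw [hq, hdiv, hmod, ih a (r / 10) ha (by rw [pow_succ] at hr; omega)]
    have h10 : (10:Nat) ^ (t+1) = 10 ^ t * 10 := by ring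
    rw [h10]
    ring

theorem revPad_eq_foldl : ∀ t m : Nat, 10 ^ t ≤ m → m < 10 ^ (t + 1) →
    revPad m (t + 1) = (Nat.digits 10 m).foldl (fun a k => a * 10 + k) 0 := by
  intro t
  induction t with
  | zero =>
    intro m h1 h2
    have hm : m < 10 := by simpa using h2
    have hm0 : 0 < m := by simpa using h1
    rw [Nat.digits_def' (show (1:Nat) < 10 by norm_num) hm0, Nat.div_eq_of_lt hm, Nat.mod_eq_of_lt hm]
    simp [revPad]
    omega
  | succ t ih =>
    intro m h1 h2
    have hm0 : 0 < m := lt_of_lt_of_le (Nat.pow_pos (by norm_num)) h1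
    have hd1 : 10 ^ t ≤ m / 10 := by
      rw [Nat.le_div_iff_mul_le (by norm_num)]
      calc 10 ^ t * 10 = 10 ^ (t + 1) := by ring
        _ ≤ m := h1
    have hd2 : m / 10 < 10 ^ (t + 1) := by
      rw [Nat.div_lt_iff_lt_mul (by norm_num)]
      calc m < 10 ^ (t + 2) := h2
        _ = 10 ^ (t+1) * 10 := by ring
    have hlen : (Nat.digits 10 (m / 10)).length = t + 1 :=
      digits_length_eq (by simpa using hd1) hd2 (by omega)
    show revPad (m / 10) (t + 1) + (m % 10) * 10 ^ (t + 1) = _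
    rw [ih (m / 10) hd1 hd2]
    rw [Nat.digits_def' (show (1:Nat) < 10 by norm_num) hm0, List.foldl_cons]
    have hacc := foldl_acc (Nat.digits 10 (m / 10)) (0 * 10 + m % 10)
    rw [hlen] at hacc
    rw [hacc]
    ring

theorem revLoop_eq_revPad (t m : Nat) (h1 : 10 ^ t ≤ m) (h2 : m < 10 ^ (t + 1)) :
    revLoop (m : Int) 0 = ((revPad m (t + 1) : Nat) : Int) := by
  rw [show (0:Int) = ((0:Nat) : Int) from rfl, revLoop_eq' m 0, revPad_eq_foldl t m h1 h2]

theorem pyRange_eq_map_range (a : Int) (n : Nat) (b : Int) (hb : b = a + n) :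
    PySem.List.pyRange a b 1 = (List.range n).map (fun k : Nat => a + (k : Int)) := by
  subst hb
  have h : ((a + (n:Int)) - a).toNat = n := by omega
  rw [PySem.List.pyRange_one, h]

theorem range_mul_flatMap (a b : Nat) :
    List.range (a * b) = (List.range a).flatMap (fun i => (List.range b).map (fun j => i * b + j)) := by
  induction a with
  | zero => simp
  | succ a ih =>
    rw [show (a + 1) * b = a * b + b by ring, List.range_add, List.range_succ, ih]
    simp

theorem inner_even : ∀ t : Nat, innerPal (2 * (t : Int)) =
    (List.range (10 ^ t)).map (fun r : Nat => ((r * 10 ^ t + revPad r t : Nat) : Int)) := by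
  intro t
  induction t with
  | zero => simp [innerPal, revPad]
  | succ t ih =>
    rw [innerPal, dif_neg (by omega), dif_neg (by omega)]
    have harg : (2 * ((t + 1 : Nat) : Int)) - 2 = 2 * (t : Int) := by push_cast; ring
    have hexp : ((2 * ((t + 1 : Nat) : Int)) - 1).toNat = 2 * t + 1 := by omega
    rw [harg, hexp, ih]
    rw [pyRange_eq_map_range 0 10 10 (by norm_num)]
    rw [show (10:Nat) ^ (t + 1) = 10 * 10 ^ t by ring, range_mul_flatMap]
    rw [List.flatMap_map, List.map_flatMap]
    apply List.flatMap_congr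
    intro i hi
    rw [List.mem_range] at hi
    rw [List.map_map, List.map_map]
    apply List.map_congr_left
    intro r hr
    rw [List.mem_range] at hr
    simp only [Function.comp]
    rw [revPad_top t i r hi hr]
    push_cast
    ring


theorem inner_odd : ∀ t : Nat, innerPal (2 * (t : Int) + 1) =
    (List.range (10 ^ (t + 1))).map (fun r : Nat => ((r * 10 ^ t + revPad (r / 10) t : Nat) : Int)) := by
  intro t
  induction t with
  | zero =>
    rw [show (2 * ((0:Nat):Int) + 1) = 1 by norm_num, innerPal, dif_neg (by norm_num), dif_pos rfl,
      pyRange_eq_map_range 0 10 10 (by norm_num)]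
    simp [revPad]
  | succ t ih =>
    rw [innerPal, dif_neg (by omega), dif_neg (by omega)]
    have harg : (2 * ((t + 1 : Nat) : Int) + 1) - 2 = 2 * (t : Int) + 1 := by push_cast; ring
    have hexp : ((2 * ((t + 1 : Nat) : Int) + 1) - 1).toNat = 2 * t + 2 := by omega
    rw [harg, hexp, ih]
    rw [pyRange_eq_map_range 0 10 10 (by norm_num)]
    rw [show (10:Nat) ^ (t + 1 + 1) = 10 * 10 ^ (t + 1) by ring, range_mul_flatMap]
    rw [List.flatMap_map, List.map_flatMap]
    apply List.flatMap_congr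
    intro i hi
    rw [List.mem_range] at hi
    rw [List.map_map, List.map_map]
    apply List.map_congr_left
    intro r hr
    rw [List.mem_range] at hr
    simp only [Function.comp]
    have hdiv : (i * 10 ^ (t + 1) + r) / 10 = i * 10 ^ t + r / 10 := by
      have hq : i * 10 ^ (t+1) + r = (i * 10 ^ t) * 10 + r := by ring
      rw [hq]; omega
    rw [hdiv, revPad_top t i (r / 10) hi (by rw [pow_succ] at hr; omega)]
    push_cast
    ring

theorem pn_eq : ∀ (D : Int), palindromic_numbers D = palindromic_numbers_alt D := by
  intro D
  unfold palindromic_numbers palindromic_numbers_alt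
  have hBf : (fun (out : List Int) (d : Int) =>
      if d = 1 then out ++ PySem.List.pyRange 1 10 1
      else out ++ (PySem.List.pyRange 1 10 1).flatMap (fun a =>
        (innerPal (d - 2)).map (fun p => a * 10 ^ (d - 1).toNat + p * 10 + a))) =
      (fun out d => out ++ (if d = 1 then PySem.List.pyRange 1 10 1
      else (PySem.List.pyRange 1 10 1).flatMap (fun a =>
        (innerPal (d - 2)).map (fun p => a * 10 ^ (d - 1).toNat + p * 10 + a)))) := by
    funext o d
    split <;> rfl
  rw [hBf]
  simp only [PySem.List.foldl_append_singleton_eq_map, PySem.List.foldl_append_eq_flatMap,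
    List.nil_append]
  apply List.flatMap_congr
  intro d hd
  rw [PySem.List.mem_pyRange_one] at hd
  have hd1 : 1 ≤ d := hd.1
  have hfd : PySem.Int.floordiv (d + 1) 2 = (d + 1) / 2 :=
    PySem.Int.floordiv_eq_ediv_of_pos (by omega)
  have hmod : PySem.Int.mod d 2 = d % 2 := PySem.Int.mod_eq_emod_of_pos (by omega)
  set c : Int := PySem.Int.floordiv (d + 1) 2 with hc
  have hc1 : 1 ≤ c := by rw [hfd]; omega
  set H : Nat := (c - 1).toNat with hH
  have hcH : c.toNat = H + 1 := by omega
  have hsplit : (10:Int) ^ c.toNat = 10 * 10 ^ H := by rw [hcH]; ring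
  rw [hsplit]
  have hptw := fun (n : Int) (hn : n ∈ PySem.List.pyRange (10 ^ H) (10 * 10 ^ H) 1) => by
    rw [PySem.List.mem_pyRange_one] at hn
    exact key_pointwise d n hd1 hn.1 hn.2
  rw [List.map_congr_left hptw]
  by_cases hd1' : d = 1
  · subst hd1'
    rw [if_pos rfl]
    have hHv : H = 0 := by rw [hH, hc]; decide
    rw [hHv, show ((10:Int) ^ (0:Nat)) = 1 from rfl, show (10:Int) * 1 = 10 from by norm_num]
    have : ∀ n ∈ PySem.List.pyRange 1 10 1,
        n * 10 ^ ((1:Int) - PySem.Int.floordiv (1 + 1) 2).toNat +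
          revLoop (if PySem.Int.mod 1 2 = 0 then n else PySem.Int.floordiv n 10) 0 = n := by
      intro n hn
      rw [PySem.List.mem_pyRange_one] at hn
      rw [if_neg (by decide)]
      have hfl : PySem.Int.floordiv n 10 = 0 := by
        rw [PySem.Int.floordiv_eq_ediv_of_pos (by omega)]
        omega
      rw [hfl, revLoop, dif_neg (by omega)]
      rw [show ((1:Int) - PySem.Int.floordiv (1 + 1) 2).toNat = 0 from by decide]
      norm_num
    rw [List.map_congr_left this, List.map_id']
  · rw [if_neg hd1']
    have hd2 : 2 ≤ d := by omega
    rw [pyRange_eq_map_range ((10:Int) ^ H) (9 * 10 ^ H) (10 * 10 ^ H) (by push_cast; ring)]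
    rw [pyRange_eq_map_range 1 9 10 (by norm_num)]
    rw [show (9 : Nat) * 10 ^ H = 9 * 10 ^ H from rfl, range_mul_flatMap 9 (10 ^ H)]
    rw [List.flatMap_map, List.map_flatMap, List.map_flatMap]
    apply List.flatMap_congr
    intro i hi
    rw [List.mem_range] at hi
    by_cases hev : PySem.Int.mod d 2 = 0
    · -- even d = 2H + 2
      have hdv : d = 2 * (H:Int) + 2 := by rw [hmod] at hev; omega
      have hdc : (d - c).toNat = H + 1 := by omega
      have hdm1 : (d - 1).toNat = 2 * H + 1 := by omega
      have harg2 : d - 2 = 2 * (H:Int) := by omega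
      rw [hdc, hdm1, harg2, inner_even H]
      simp only [List.map_map]
      apply List.map_congr_left
      intro r hr
      rw [List.mem_range] at hr
      simp only [Function.comp]
      rw [if_pos hev]
      have hn : (10:Int) ^ H + ↑(i * 10 ^ H + r) = (((i + 1) * 10 ^ H + r : Nat) : Int) := by
        push_cast; ring
      have hb1 : 10 ^ H ≤ (i + 1) * 10 ^ H + r := by
        have := Nat.le_mul_of_pos_left (10 ^ H) (show 0 < i + 1 by omega)
        omega
      have hb2 : (i + 1) * 10 ^ H + r < 10 ^ (H + 1) := by
        have h9 : (i + 1) * 10 ^ H ≤ 9 * 10 ^ H := Nat.mul_le_mul_right _ (by omega)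
        have : (10:Nat) ^ (H + 1) = 10 * 10 ^ H := by ring
        omega
      rw [hn, revLoop_eq_revPad H _ hb1 hb2, revPad_top H (i + 1) r (by omega) hr]
      push_cast
      ring
    · -- odd d = 2H + 1, H ≥ 1
      have hdv : d = 2 * (H:Int) + 1 := by rw [hmod] at hev; omega
      have hHpos : 1 ≤ H := by omega
      obtain ⟨u, hu⟩ : ∃ u, H = u + 1 := ⟨H - 1, by omega⟩
      rw [hu]
      rw [hu] at hdv
      have hdc : (d - c).toNat = u + 1 := by omega
      have hdm1 : (d - 1).toNat = 2 * u + 2 := by omega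
      have harg2 : d - 2 = 2 * (u:Int) + 1 := by omega
      rw [hdc, hdm1, harg2, inner_odd u]
      simp only [List.map_map]
      apply List.map_congr_left
      intro r hr
      rw [List.mem_range] at hr
      simp only [Function.comp]
      rw [if_neg hev]
      have hn : (10:Int) ^ (u + 1) + ↑(i * 10 ^ (u + 1) + r) = (((i + 1) * 10 ^ (u + 1) + r : Nat) : Int) := by
        push_cast; ring
      have hdiv10 : ((i + 1) * 10 ^ (u + 1) + r) / 10 = (i + 1) * 10 ^ u + r / 10 := by
        have hq : (i + 1) * 10 ^ (u + 1) + r = ((i + 1) * 10 ^ u) * 10 + r := by ring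
        rw [hq]; omega
      have hb1 : 10 ^ u ≤ (i + 1) * 10 ^ u + r / 10 := by
        have := Nat.le_mul_of_pos_left (10 ^ u) (show 0 < i + 1 by omega)
        omega
      have hb2 : (i + 1) * 10 ^ u + r / 10 < 10 ^ (u + 1) := by
        have h9 : (i + 1) * 10 ^ u ≤ 9 * 10 ^ u := Nat.mul_le_mul_right _ (by omega)
        have hr10 : r / 10 < 10 ^ u := by
          have : (10:Nat) ^ (u + 1) = 10 ^ u * 10 := by ring
          omega
        have : (10:Nat) ^ (u + 1) = 10 * 10 ^ u := by ring
        omega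
      rw [hn, show PySem.Int.floordiv (((i + 1) * 10 ^ (u + 1) + r : Nat) : Int) 10 =
            ((((i + 1) * 10 ^ (u + 1) + r) / 10 : Nat) : Int) from PySem.Int.floordiv_natCast _ 10]
      have hr10' : r / 10 < 10 ^ u := by
        have h10 : (10:Nat) ^ (u + 1) = 10 ^ u * 10 := by ring
        omega
      rw [hdiv10, revLoop_eq_revPad u _ hb1 hb2, revPad_top u (i + 1) (r / 10) (by omega) hr10']
      push_cast
      ring

-- ===== VERDICT (by name: the statement is the Claim_ definition above) =====
theorem palindromic_numbers_spec : Claim_equal_palindromic_numbers := by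
  intro D _
  unfold Spec_palindromic_numbers
  exact pn_eq D
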